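-- pv_equiv track=rewrite | github.com/jpbascur/SciMacro-noGUI | My_Module/merging.py | get_Connections_Dict
-- ===== SOURCE A (Python) =====
-- def get_Connections_Dict(cluster_dict, membership_dict, n_e_dict):
--     connections_dict = {}
--     for n_1 in membership_dict:
--         c_1 = membership_dict[n_1]
--         if c_1 not in connections_dict:
--             connections_dict[c_1] = {}
--         targets_set = n_e_dict[n_1]
--         for n_2 in targets_set:
--             if n_2 in membership_dict:
--                 c_2 = membership_dict[n_2]
--                 if c_1 != c_2:
--                     if c_2 not in connections_dict[c_1]:
--                         connections_dict[c_1][c_2] = 1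
--                     else:
--                         connections_dict[c_1][c_2] += 1
--                 else:
--                     pass
--     return connections_dict
-- ===== SOURCE B (Python) =====
-- def get_Connections_Dict(cluster_dict, membership_dict, n_e_dict):
--     # Group nodes by their cluster (first-appearance order), then count each
--     # cluster's outgoing inter-cluster edges independently.
--     members = {}
--     for n, c in membership_dict.items():
--         members.setdefault(c, []).append(n)
--     connections_dict = {}
--     for c, nodes in members.items():
--         counts = {}
--         for n in nodes:
--             for t in n_e_dict[n]:
--                 c2 = membership_dict.get(t)
--                 if c2 is not None and c2 != c:
--                     counts[c2] = counts.get(c2, 0) + 1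
--         connections_dict[c] = counts
--     return connections_dict
-- ===== Notes on version B (the rewrite author's own statement) =====
-- stated objective: alternative
-- what changed: B first groups nodes by their cluster and then counts each cluster's outgoing inter-cluster edges in an independent per-cluster pass, instead of A's single interleaved pass that increments a nested dict in place.
import Mathlib
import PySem

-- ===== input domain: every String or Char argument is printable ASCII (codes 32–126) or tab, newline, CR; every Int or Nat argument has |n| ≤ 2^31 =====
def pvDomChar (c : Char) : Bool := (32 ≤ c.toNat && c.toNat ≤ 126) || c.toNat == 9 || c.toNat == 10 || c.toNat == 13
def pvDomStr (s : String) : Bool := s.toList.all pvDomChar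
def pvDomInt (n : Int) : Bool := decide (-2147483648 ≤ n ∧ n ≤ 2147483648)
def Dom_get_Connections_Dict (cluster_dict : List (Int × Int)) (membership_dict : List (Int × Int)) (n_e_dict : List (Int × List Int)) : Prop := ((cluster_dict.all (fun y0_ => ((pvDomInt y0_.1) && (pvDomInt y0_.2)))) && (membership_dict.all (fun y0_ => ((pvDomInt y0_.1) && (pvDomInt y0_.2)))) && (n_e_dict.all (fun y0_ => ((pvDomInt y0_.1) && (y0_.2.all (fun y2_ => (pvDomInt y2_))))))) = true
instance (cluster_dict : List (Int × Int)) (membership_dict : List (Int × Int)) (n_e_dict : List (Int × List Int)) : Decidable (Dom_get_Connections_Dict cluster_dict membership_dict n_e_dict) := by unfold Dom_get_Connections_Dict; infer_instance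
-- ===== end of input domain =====

-- B groups nodes by cluster first and then counts each cluster's outgoing inter-cluster
-- edges in an independent per-cluster pass, instead of A's single interleaved pass that
-- increments a nested dict in place; same cost, different decomposition ("alternative").

-- ===== PORT A =====
-- literal transliteration of A: one pass over the membership keys, incrementally
-- updating a nested dict.  n_e_dict[n_1] is ported as getD (exact under Pre_, which
-- says the key is present; Python raises KeyError otherwise).
def get_Connections_Dict (cluster_dict : List (Int × Int)) (membership_dict : List (Int × Int)) (n_e_dict : List (Int × List Int)) : List (Int × List (Int × Int)) :=
  let md := PySem.Dict.ofList membership_dict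
  let ned := PySem.Dict.ofList n_e_dict
  let conn : PySem.Dict Int (PySem.Dict Int Int) :=
    md.keys.foldl (fun conn n1 =>
      let c1 := md.getD n1 0          -- membership_dict[n_1]; n1 is a key of md, exact
      let conn := if conn.contains c1 then conn else conn.insert c1 PySem.Dict.empty
      (ned.getD n1 []).foldl (fun conn n2 =>
        if md.contains n2 then
          let c2 := md.getD n2 0      -- membership_dict[n_2]; guarded by contains, exact
          if c1 ≠ c2 then
            conn.modify c1 PySem.Dict.empty (fun inner =>
              if inner.contains c2 then inner.insert c2 (inner.getD c2 0 + 1)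
              else inner.insert c2 1)
          else conn
        else conn) conn) PySem.Dict.empty
  conn.items.map (fun p => (p.1, p.2.items))

-- ===== PORT B =====
-- literal transliteration of B (Source B): group nodes by cluster, then one independent
-- counting pass per cluster.
def get_Connections_Dict_alt (cluster_dict : List (Int × Int)) (membership_dict : List (Int × Int)) (n_e_dict : List (Int × List Int)) : List (Int × List (Int × Int)) :=
  let md := PySem.Dict.ofList membership_dict
  let ned := PySem.Dict.ofList n_e_dict
  let members : PySem.Dict Int (List Int) :=
    md.items.foldl (fun m p => m.modify p.2 [] (fun l => l ++ [p.1])) PySem.Dict.empty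
      -- members.setdefault(c, []).append(n)
  let out : PySem.Dict Int (PySem.Dict Int Int) :=
    members.items.foldl (fun out cm =>
      let counts : PySem.Dict Int Int :=
        cm.2.foldl (fun counts n =>
          (ned.getD n []).foldl (fun counts t =>   -- n_e_dict[n]; exact under Pre_
            match md.get? t with                    -- membership_dict.get(t)
            | some c2 => if c2 ≠ cm.1 then counts.insert c2 (counts.getD c2 0 + 1) else counts
            | none => counts) counts) PySem.Dict.empty
      out.insert cm.1 counts) PySem.Dict.empty
  out.items.map (fun p => (p.1, p.2.items))

-- ===== PRECONDITION & SPEC =====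
-- Pre_: every node of membership_dict has an entry in n_e_dict; on any other input
-- Python A raises KeyError at n_e_dict[n_1] (and B raises the same way).
def Pre_get_Connections_Dict (cluster_dict : List (Int × Int)) (membership_dict : List (Int × Int)) (n_e_dict : List (Int × List Int)) : Prop :=
  ∀ p ∈ membership_dict, p.1 ∈ n_e_dict.map Prod.fst
instance (cluster_dict : List (Int × Int)) (membership_dict : List (Int × Int)) (n_e_dict : List (Int × List Int)) : Decidable (Pre_get_Connections_Dict cluster_dict membership_dict n_e_dict) := by unfold Pre_get_Connections_Dict; infer_instance

def pvWitness_get_Connections_Dict : (List (Int × Int)) × (List (Int × Int)) × (List (Int × List Int)) :=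
  ([], [(1, 10), (2, 20), (3, 10)], [(1, [2, 3]), (2, [1, 1]), (3, [2, 7])])

def Spec_get_Connections_Dict (cluster_dict : List (Int × Int)) (membership_dict : List (Int × Int)) (n_e_dict : List (Int × List Int)) (out : List (Int × List (Int × Int))) : Prop := out = get_Connections_Dict_alt cluster_dict membership_dict n_e_dict
instance (cluster_dict : List (Int × Int)) (membership_dict : List (Int × Int)) (n_e_dict : List (Int × List Int)) (out : List (Int × List (Int × Int))) : Decidable (Spec_get_Connections_Dict cluster_dict membership_dict n_e_dict out) := by unfold Spec_get_Connections_Dict; infer_instance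

-- ===== CLAIM (what is proved, stated in full; the proofs are below) =====
def Claim_equal_get_Connections_Dict : Prop := ∀ (cluster_dict : List (Int × Int)) (membership_dict : List (Int × Int)) (n_e_dict : List (Int × List Int)), Dom_get_Connections_Dict cluster_dict membership_dict n_e_dict → Pre_get_Connections_Dict cluster_dict membership_dict n_e_dict → Spec_get_Connections_Dict cluster_dict membership_dict n_e_dict (get_Connections_Dict cluster_dict membership_dict n_e_dict)

-- ===== LEMMAS AND PROOFS =====
def pvBump (i : PySem.Dict Int Int) (c2 : Int) : PySem.Dict Int Int := i.insert c2 (i.getD c2 0 + 1)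
def pvTlist (md : PySem.Dict Int Int) (c : Int) (ts : List Int) : List Int :=
  ts.filterMap (fun t => match md.get? t with
    | some c2 => if c2 ≠ c then some c2 else none
    | none => none)

theorem pvL1 (md : PySem.Dict Int Int) (c1 : Int) :
    ∀ (ts : List Int) (e : PySem.Dict Int (PySem.Dict Int Int)),
    ts.foldl (fun conn n2 =>
        if md.contains n2 then
          if c1 ≠ md.getD n2 0 then
            conn.modify c1 PySem.Dict.empty (fun inner =>
              if inner.contains (md.getD n2 0) then inner.insert (md.getD n2 0) (inner.getD (md.getD n2 0) 0 + 1)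
              else inner.insert (md.getD n2 0) 1)
          else conn
        else conn) e
      = (pvTlist md c1 ts).foldl (fun e c2 => e.modify c1 PySem.Dict.empty (fun i => pvBump i c2)) e := by
  intro ts
  induction ts with
  | nil => intro e; rfl
  | cons t ts ih =>
    intro e
    rw [List.foldl_cons]
    show ts.foldl _ (if md.contains t = true then _ else _) = _
    rcases h : md.get? t with _ | c2
    · have hc : md.contains t = false := by
        rw [PySem.Dict.contains_eq_isSome_get?, h]; rfl
      rw [hc, if_neg (by simp)]
      rw [show pvTlist md c1 (t :: ts) = pvTlist md c1 ts from by simp [pvTlist, h]]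
      exact ih e
    · have hc : md.contains t = true := by
        rw [PySem.Dict.contains_eq_isSome_get?, h]; rfl
      have hg : md.getD t 0 = c2 := PySem.Dict.getD_of_get?_eq_some _ _ h
      rw [hc, if_pos rfl, hg]
      by_cases hne : c2 = c1
      · rw [if_neg (by simp [hne])]
        rw [show pvTlist md c1 (t :: ts) = pvTlist md c1 ts from by simp [pvTlist, h, hne]]
        exact ih e
      · rw [if_pos (Ne.symm hne)]
        have hinner : (fun (inner : PySem.Dict Int Int) =>
            if inner.contains c2 = true then inner.insert c2 (inner.getD c2 0 + 1) else inner.insert c2 1)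
            = fun i => pvBump i c2 := by
          funext i
          by_cases hi : i.contains c2 = true
          · simp [hi, pvBump]
          · simp only [Bool.not_eq_true] at hi
            have h0 : i.getD c2 0 = 0 := PySem.Dict.getD_of_not_contains _ _ hi
            simp [pvBump, h0]
        rw [hinner,
          show pvTlist md c1 (t :: ts) = c2 :: pvTlist md c1 ts from by simp [pvTlist, h, hne],
          List.foldl_cons]
        exact ih _

-- L2: getD through a fold of modifies at fixed key c1
theorem pvL2 (c1 c : Int) :
    ∀ (l : List Int) (e : PySem.Dict Int (PySem.Dict Int Int)),
    (l.foldl (fun e c2 => e.modify c1 PySem.Dict.empty (fun i => pvBump i c2)) e).getD c PySem.Dict.empty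
      = if c = c1 then l.foldl pvBump (e.getD c1 PySem.Dict.empty) else e.getD c PySem.Dict.empty := by
  intro l
  induction l with
  | nil => intro e; split <;> simp_all
  | cons x l ih =>
    intro e
    rw [List.foldl_cons, ih, List.foldl_cons]
    by_cases hc : c = c1
    · rw [if_pos hc, if_pos hc, PySem.Dict.getD_modify_self]
    · rw [if_neg hc, if_neg hc, PySem.Dict.getD_modify_of_ne]
      exact hc

-- ensure step: invisible to getD _ ∅
theorem pvEnsure_getD (e : PySem.Dict Int (PySem.Dict Int Int)) (c1 c : Int) :
    (if e.contains c1 then e else e.insert c1 PySem.Dict.empty).getD c PySem.Dict.empty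
      = e.getD c PySem.Dict.empty := by
  by_cases h : e.contains c1 = true
  · rw [if_pos h]
  · simp only [Bool.not_eq_true] at h
    rw [if_neg (by simp [h]), PySem.Dict.getD_insert]
    split
    · rename_i hc; subst hc; exact (PySem.Dict.getD_of_not_contains _ _ h).symm
    · rfl

-- Set.update by elements already present is a no-op
theorem pvUpdate_mem (c1 : Int) :
    ∀ (l : List Int) (s : PySem.Set Int), c1 ∈ s →
    PySem.Set.update s (l.map (fun _ => c1)) = s := by
  intro l
  induction l with
  | nil => intro s _; rfl
  | cons x l ih =>
    intro s hs
    rw [List.map_cons, PySem.Set.update_cons,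
      show PySem.Set.add s c1 = s from by simp [PySem.Set.add, PySem.Set.contains, hs]]
    exact ih s hs

-- ensure step on keys
theorem pvEnsure_keys (e : PySem.Dict Int (PySem.Dict Int Int)) (c1 : Int) :
    (if e.contains c1 then e else e.insert c1 PySem.Dict.empty).keys
      = PySem.Set.add e.keys c1 := by
  by_cases h : e.contains c1 = true
  · rw [if_pos h]
    have : c1 ∈ e.keys := (PySem.Dict.contains_iff_mem_keys _ _).mp h
    simp [PySem.Set.add, PySem.Set.contains, this]
  · simp only [Bool.not_eq_true] at h
    rw [if_neg (by simp [h]), PySem.Dict.keys_insert_of_not_contains _ _ h]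
    have : ¬ c1 ∈ e.keys := fun hm => by
      rw [(PySem.Dict.contains_iff_mem_keys _ _).mpr hm] at h; cases h
    simp [PySem.Set.add, PySem.Set.contains, this]

def pvT (md : PySem.Dict Int Int) (ned : PySem.Dict Int (List Int)) (c n : Int) : List Int :=
  pvTlist md c (ned.getD n [])

def pvAbody (md : PySem.Dict Int Int) (ned : PySem.Dict Int (List Int)) :
    PySem.Dict Int (PySem.Dict Int Int) → Int → PySem.Dict Int (PySem.Dict Int Int) :=
  fun conn n1 =>
    let c1 := md.getD n1 0
    let conn := if conn.contains c1 then conn else conn.insert c1 PySem.Dict.empty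
    (ned.getD n1 []).foldl (fun conn n2 =>
      if md.contains n2 then
        let c2 := md.getD n2 0
        if c1 ≠ c2 then
          conn.modify c1 PySem.Dict.empty (fun inner =>
            if inner.contains c2 then inner.insert c2 (inner.getD c2 0 + 1)
            else inner.insert c2 1)
        else conn
      else conn) conn

theorem pvAbody_eq (md : PySem.Dict Int Int) (ned : PySem.Dict Int (List Int))
    (e : PySem.Dict Int (PySem.Dict Int Int)) (n : Int) :
    pvAbody md ned e n
      = (pvT md ned (md.getD n 0) n).foldl
          (fun e c2 => e.modify (md.getD n 0) PySem.Dict.empty (fun i => pvBump i c2))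
          (if e.contains (md.getD n 0) then e else e.insert (md.getD n 0) PySem.Dict.empty) := by
  rw [pvAbody, pvT, ← pvL1 md (md.getD n 0) (ned.getD n [])]

theorem pvA_keys (md : PySem.Dict Int Int) (ned : PySem.Dict Int (List Int)) :
    ∀ (ns : List Int) (e : PySem.Dict Int (PySem.Dict Int Int)),
    (ns.foldl (pvAbody md ned) e).keys = PySem.Set.update e.keys (ns.map (fun n => md.getD n 0)) := by
  intro ns
  induction ns with
  | nil => intro e; rfl
  | cons n ns ih =>
    intro e
    rw [List.foldl_cons, ih, pvAbody_eq,
      PySem.Dict.keys_foldl_modify_key _ (fun _ => md.getD n 0) _ (fun _ c2 i => pvBump i c2),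
      pvEnsure_keys,
      pvUpdate_mem _ _ _ ((PySem.Set.mem_add _ _ _).mpr (Or.inr rfl)),
      List.map_cons, PySem.Set.update_cons]

theorem pvA_getD (md : PySem.Dict Int Int) (ned : PySem.Dict Int (List Int)) (c : Int) :
    ∀ (ns : List Int) (e : PySem.Dict Int (PySem.Dict Int Int)),
    (ns.foldl (pvAbody md ned) e).getD c PySem.Dict.empty
      = ((ns.filter (fun n => md.getD n 0 == c)).flatMap (pvT md ned c)).foldl pvBump
          (e.getD c PySem.Dict.empty) := by
  intro ns
  induction ns with
  | nil => intro e; rfl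
  | cons n ns ih =>
    intro e
    rw [List.foldl_cons, ih]
    by_cases hc : md.getD n 0 = c
    · rw [show (n :: ns).filter (fun n => md.getD n 0 == c) = n :: ns.filter (fun n => md.getD n 0 == c) from by
          simp [hc],
        List.flatMap_cons, List.foldl_append]
      congr 1
      rw [pvAbody_eq, pvL2, if_pos hc.symm, pvEnsure_getD, hc]
    · rw [show (n :: ns).filter (fun n => md.getD n 0 == c) = ns.filter (fun n => md.getD n 0 == c) from by
          simp [hc]]
      congr 1
      rw [pvAbody_eq, pvL2, if_neg (fun h => hc h.symm), pvEnsure_getD]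

def pvCanon (md : PySem.Dict Int Int) (ned : PySem.Dict Int (List Int)) : List (Int × List (Int × Int)) :=
  (PySem.Set.ofList (md.keys.map (fun n => md.getD n 0))).map (fun c =>
    (c, (((md.keys.filter (fun n => md.getD n 0 == c)).flatMap (pvT md ned c)).foldl pvBump PySem.Dict.empty).items))

theorem pvA_eq_canon (md : PySem.Dict Int Int) (ned : PySem.Dict Int (List Int)) :
    (md.keys.foldl (fun conn n1 =>
      let c1 := md.getD n1 0
      let conn := if conn.contains c1 then conn else conn.insert c1 PySem.Dict.empty
      (ned.getD n1 []).foldl (fun conn n2 =>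
        if md.contains n2 then
          let c2 := md.getD n2 0
          if c1 ≠ c2 then
            conn.modify c1 PySem.Dict.empty (fun inner =>
              if inner.contains c2 then inner.insert c2 (inner.getD c2 0 + 1)
              else inner.insert c2 1)
          else conn
        else conn) conn) (PySem.Dict.empty : PySem.Dict Int (PySem.Dict Int Int))).items.map
        (fun p => (p.1, p.2.items)) = pvCanon md ned := by
  show ((md.keys.foldl (pvAbody md ned) PySem.Dict.empty).items.map (fun p => (p.1, p.2.items))) = _
  have hk : (md.keys.foldl (pvAbody md ned) PySem.Dict.empty).keys
      = PySem.Set.ofList (md.keys.map (fun n => md.getD n 0)) := by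
    rw [pvA_keys, PySem.Dict.keys_empty, PySem.Set.update_nil_left]
  have hnd : (md.keys.foldl (pvAbody md ned) PySem.Dict.empty).keys.Nodup := by
    rw [hk]; exact PySem.Set.nodup_ofList _
  rw [PySem.Dict.items_eq_map_keys _ hnd PySem.Dict.empty, List.map_map, hk, pvCanon]
  apply List.map_congr_left
  intro c _
  simp only [Function.comp_apply]
  rw [pvA_getD, PySem.Dict.getD_empty]

-- B1: B's innermost loop = pvTlist fold of pvBump
theorem pvB1 (md : PySem.Dict Int Int) (c : Int) :
    ∀ (ts : List Int) (counts : PySem.Dict Int Int),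
    ts.foldl (fun counts t =>
        match md.get? t with
        | some c2 => if c2 ≠ c then counts.insert c2 (counts.getD c2 0 + 1) else counts
        | none => counts) counts
      = (pvTlist md c ts).foldl pvBump counts := by
  intro ts
  induction ts with
  | nil => intro counts; rfl
  | cons t ts ih =>
    intro counts
    rw [List.foldl_cons]
    rcases h : md.get? t with _ | c2
    · rw [show pvTlist md c (t :: ts) = pvTlist md c ts from by simp [pvTlist, h]]
      exact ih counts
    · by_cases hne : c2 = c
      · rw [show pvTlist md c (t :: ts) = pvTlist md c ts from by simp [pvTlist, h, hne]]
        show ts.foldl _ (if c2 ≠ c then counts.insert c2 (counts.getD c2 0 + 1) else counts) = _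
        rw [if_neg (by simp [hne])]
        exact ih counts
      · rw [show pvTlist md c (t :: ts) = c2 :: pvTlist md c ts from by simp [pvTlist, h, hne],
          List.foldl_cons]
        show ts.foldl _ (if c2 ≠ c then counts.insert c2 (counts.getD c2 0 + 1) else counts) = _
        rw [if_pos hne]
        exact ih _

-- B2: folding pvBump node by node = folding over the flattened list
theorem pvB2 (g : Int → List Int) :
    ∀ (ns : List Int) (a : PySem.Dict Int Int),
    ns.foldl (fun a n => (g n).foldl pvBump a) a = (ns.flatMap g).foldl pvBump a := by
  intro ns
  induction ns with
  | nil => intro a; rfl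
  | cons n ns ih => intro a; rw [List.foldl_cons, List.flatMap_cons, List.foldl_append, ih]

theorem pvB_eq_canon (md : PySem.Dict Int Int) (ned : PySem.Dict Int (List Int))
    (hmd : md.keys.Nodup) :
    ((md.items.foldl (fun m p => m.modify p.2 [] (fun l => l ++ [p.1]))
        (PySem.Dict.empty : PySem.Dict Int (List Int))).items.foldl (fun out cm =>
      let counts : PySem.Dict Int Int :=
        cm.2.foldl (fun counts n =>
          (ned.getD n []).foldl (fun counts t =>
            match md.get? t with
            | some c2 => if c2 ≠ cm.1 then counts.insert c2 (counts.getD c2 0 + 1) else counts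
            | none => counts) counts) PySem.Dict.empty
      out.insert cm.1 counts) (PySem.Dict.empty : PySem.Dict Int (PySem.Dict Int Int))).items.map
        (fun p => (p.1, p.2.items)) = pvCanon md ned := by
  -- the grouping dict
  set members := md.items.foldl (fun m p => m.modify p.2 [] (fun l => l ++ [p.1]))
      (PySem.Dict.empty : PySem.Dict Int (List Int)) with hmem
  -- its keys and per-key node lists
  have hkeys : members.keys = PySem.Set.ofList (md.keys.map (fun n => md.getD n 0)) := by
    have h1 : members.keys
        = PySem.Set.update (PySem.Dict.empty : PySem.Dict Int (List Int)).keys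
            (md.items.map (fun p => p.2)) :=
      PySem.Dict.keys_foldl_modify_key md.items (fun p => p.2) [] (fun _ p l => l ++ [p.1])
        PySem.Dict.empty
    rw [h1, PySem.Dict.keys_empty, PySem.Set.update_nil_left,
      PySem.Dict.items_eq_map_keys md hmd 0, List.map_map]
    simp [Function.comp_def]
  have hnd : members.keys.Nodup := by
    rw [hkeys]; exact PySem.Set.nodup_ofList _
  have hgetD : ∀ c, members.getD c [] = md.keys.filter (fun n => md.getD n 0 == c) := by
    intro c
    have h2 : members = (md.items.map (fun p => (p.2, p.1))).foldl
        (fun (d : PySem.Dict Int (List Int)) q => d.modify q.1 [] (fun l => l ++ [q.2]))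
        PySem.Dict.empty :=
      (@List.foldl_map (Int × Int) (Int × Int) (PySem.Dict Int (List Int))
        (fun p => (p.2, p.1)) (fun d q => d.modify q.1 [] (fun l => l ++ [q.2]))
        md.items PySem.Dict.empty).symm
    rw [h2, PySem.Dict.getD_foldl_modify_append, PySem.Dict.getD_empty,
      PySem.Dict.items_eq_map_keys md hmd 0]
    simp [List.filter_map, Function.comp_def]
  -- the outer insert loop appends fresh items
  have hfresh : ∀ cm ∈ members.items,
      (PySem.Dict.empty : PySem.Dict Int (PySem.Dict Int Int)).contains cm.1 = false :=
    fun _ _ => PySem.Dict.contains_empty _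
  have hmapnd : (members.items.map (fun cm => cm.1)).Nodup := hnd
  rw [PySem.Dict.items_foldl_insert_fresh members.items (fun cm => cm.1) _ _ hfresh hmapnd]
  rw [show (PySem.Dict.empty : PySem.Dict Int (PySem.Dict Int Int)).items = [] from rfl,
    List.nil_append, PySem.Dict.items_eq_map_keys members hnd [], List.map_map, List.map_map,
    hkeys, pvCanon]
  apply List.map_congr_left
  intro c _
  simp only [Function.comp_apply]
  congr 1
  have : ∀ (nodes : List Int),
      nodes.foldl (fun counts n =>
        (ned.getD n []).foldl (fun counts t =>
          match md.get? t with
          | some c2 => if c2 ≠ c then counts.insert c2 (counts.getD c2 0 + 1) else counts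
          | none => counts) counts) (PySem.Dict.empty : PySem.Dict Int Int)
      = (nodes.flatMap (pvT md ned c)).foldl pvBump PySem.Dict.empty := by
    intro nodes
    rw [← pvB2]
    apply PySem.List.foldl_congr_mem
    intro a n _
    rw [pvB1, pvT]
  rw [this, hgetD]

-- ===== VERDICT (by name: the statement is the Claim_ definition above) =====
theorem get_Connections_Dict_spec : Claim_equal_get_Connections_Dict := by
  intro cd mdl nedl _ _
  unfold Spec_get_Connections_Dict get_Connections_Dict get_Connections_Dict_alt
  rw [pvA_eq_canon, pvB_eq_canon _ _ (PySem.Dict.nodup_keys_ofList mdl)]
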